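-- pv_equiv track=rewrite | github.com/OSU-Cascades-CS331-Spring-2024/programming-assignment-1-search-KameronBeamer | map.py | translate_coordinate_string_to_num
-- ===== SOURCE A (Python) =====
-- def translate_coordinate_string_to_num(coordinate_string, direction):
--     coordinate_list = coordinate_string.split(" ")
--     coordinate_num = 0
--
--     # iterates through the coordinate backwards to use the minutes/hours multiplier
--     multiplier_counter = 0
--     for string in reversed(coordinate_list):
--         temp_num = int(string)
--         for i in range(multiplier_counter):
--             temp_num *= 60
--         multiplier_counter += 1
--         coordinate_num += temp_num
--
--     # returns possitive num for N and E coordinates, negative for S and W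
--     if direction == "N" or direction == "E":
--         return coordinate_num
--     else:
--         return 0 - coordinate_num
-- ===== SOURCE B (Python) =====
-- def translate_coordinate_string_to_num(coordinate_string, direction):
--     coordinate_num = 0
--     for token in coordinate_string.split(" "):
--         coordinate_num = coordinate_num * 60 + int(token)
--     if direction == "N" or direction == "E":
--         return coordinate_num
--     return -coordinate_num
-- ===== Notes on version B (the rewrite author's own statement) =====
-- stated objective: simpler
-- what changed: Single forward Horner pass (acc = acc*60 + int(token)) replaces the reversed iteration with a multiplier counter and an inner repeated-multiplication loop.
-- outside the precondition, e.g. on translate_coordinate_string_to_num('1 x', 'N'): A raises ValueError, B raises ValueError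
import Mathlib
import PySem

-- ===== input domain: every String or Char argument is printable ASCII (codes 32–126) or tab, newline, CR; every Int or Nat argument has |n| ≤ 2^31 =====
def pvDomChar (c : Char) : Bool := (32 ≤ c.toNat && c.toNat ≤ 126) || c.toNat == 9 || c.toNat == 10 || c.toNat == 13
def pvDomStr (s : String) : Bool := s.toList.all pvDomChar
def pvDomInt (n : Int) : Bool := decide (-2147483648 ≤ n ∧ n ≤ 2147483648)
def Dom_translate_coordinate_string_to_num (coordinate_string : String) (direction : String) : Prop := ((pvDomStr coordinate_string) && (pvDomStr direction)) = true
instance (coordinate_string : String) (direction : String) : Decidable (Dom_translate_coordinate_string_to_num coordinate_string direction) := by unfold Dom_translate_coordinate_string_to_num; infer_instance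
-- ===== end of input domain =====

-- B: single forward Horner pass replaces A's reversed loop with multiplier counter and inner repeated-multiplication loop (same return values; same inputs raise).
-- ===== PORT A =====
def translate_coordinate_string_to_num (coordinate_string : String) (direction : String) : Int :=
  let coordinate_list := PySem.Chars.splitOn coordinate_string.toList [' ']
  -- state = (multiplier_counter, coordinate_num); int(string) is total under Pre_ (getD 0 is unreachable there)
  let st := coordinate_list.reverse.foldl
    (fun (acc : Nat × Int) s =>
      let temp_num := (PySem.Int.ofChars? s).getD 0
      let temp_num := (List.range acc.1).foldl (fun t _ => t * 60) temp_num
      (acc.1 + 1, acc.2 + temp_num)) (0, 0)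
  if direction == "N" || direction == "E" then st.2 else 0 - st.2

-- ===== PORT B =====
def translate_coordinate_string_to_num_alt (coordinate_string : String) (direction : String) : Int :=
  let coordinate_num := (PySem.Chars.splitOn coordinate_string.toList [' ']).foldl
    (fun acc token => acc * 60 + (PySem.Int.ofChars? token).getD 0) 0
  if direction == "N" || direction == "E" then coordinate_num else -coordinate_num

-- ===== PRECONDITION & SPEC =====
-- Pre_ excludes exactly the inputs where int(token) raises ValueError (a non-integer or empty token)
def Pre_translate_coordinate_string_to_num (coordinate_string : String) (direction : String) : Prop :=
  (PySem.Chars.splitOn coordinate_string.toList [' ']).all (fun t => (PySem.Int.ofChars? t).isSome) = true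
instance (coordinate_string : String) (direction : String) : Decidable (Pre_translate_coordinate_string_to_num coordinate_string direction) := by unfold Pre_translate_coordinate_string_to_num; infer_instance
def pvWitness_translate_coordinate_string_to_num : String × String := ("44 3 29", "N")

def Spec_translate_coordinate_string_to_num (coordinate_string : String) (direction : String) (out : Int) : Prop := out = translate_coordinate_string_to_num_alt coordinate_string direction
instance (coordinate_string : String) (direction : String) (out : Int) : Decidable (Spec_translate_coordinate_string_to_num coordinate_string direction out) := by unfold Spec_translate_coordinate_string_to_num; infer_instance

-- ===== CLAIM (what is proved, stated in full; the proofs are below) =====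
def Claim_equal_translate_coordinate_string_to_num : Prop := ∀ (coordinate_string : String) (direction : String), Dom_translate_coordinate_string_to_num coordinate_string direction → Pre_translate_coordinate_string_to_num coordinate_string direction → Spec_translate_coordinate_string_to_num coordinate_string direction (translate_coordinate_string_to_num coordinate_string direction)

-- ===== LEMMAS AND PROOFS =====
-- value of a token (both ports use it)
def pvTok (t : List Char) : Int := (PySem.Int.ofChars? t).getD 0

lemma pv_range_pow (n : Nat) (t : Int) :
    (List.range n).foldl (fun t _ => t * 60) t = t * 60 ^ n := by
  induction n generalizing t with
  | zero => simp
  | succ m ih => rw [List.range_succ, List.foldl_append, ih]; simp [List.foldl]; ring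

lemma pv_horner_shift (l : List (List Char)) (a : Int) :
    l.foldl (fun acc t => acc * 60 + pvTok t) a
      = a * 60 ^ l.length + l.foldl (fun acc t => acc * 60 + pvTok t) 0 := by
  induction l generalizing a with
  | nil => simp
  | cons x xs ih =>
    simp only [List.foldl_cons, List.length_cons]
    rw [ih (a * 60 + pvTok x), ih (0 * 60 + pvTok x)]
    ring

lemma pv_key (l : List (List Char)) (k : Nat) (acc : Int) :
    l.reverse.foldl
      (fun (acc : Nat × Int) s =>
        let temp_num := (PySem.Int.ofChars? s).getD 0
        let temp_num := (List.range acc.1).foldl (fun t _ => t * 60) temp_num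
        (acc.1 + 1, acc.2 + temp_num)) (k, acc)
      = (k + l.length, acc + (l.foldl (fun a t => a * 60 + pvTok t) 0) * 60 ^ k) := by
  induction l generalizing k acc with
  | nil => simp
  | cons x xs ih =>
    simp only [List.reverse_cons, List.foldl_append, List.foldl_cons, List.foldl_nil,
      List.length_cons, ih]
    rw [pv_range_pow]
    rw [pv_horner_shift xs (0 * 60 + pvTok x)]
    refine Prod.ext (by omega) ?_
    simp only [pvTok]
    ring

-- ===== VERDICT (by name: the statement is the Claim_ definition above) =====
theorem translate_coordinate_string_to_num_spec : Claim_equal_translate_coordinate_string_to_num := by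
  intro cs dir _ _
  unfold Spec_translate_coordinate_string_to_num translate_coordinate_string_to_num
    translate_coordinate_string_to_num_alt
  simp only [pv_key, pvTok]
  split <;> ring_nf
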